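-- pv_equiv track=rewrite | github.com/nkaenzig/CnC-Detection | Sourcecode/bro_misc.py | match_prefix
-- ===== SOURCE A (Python) =====
-- def match_prefix(ip, prefix_list, prefix_lengths):
--     """
--     Checks if the specified IP matches one of the prefixes in the prefix_list
--
--     :return: True, if a match is found
--     """
--     prefix_match = False
--     for prefix, len in zip(prefix_list, prefix_lengths):
--         if len <= 4:
--             if ip.split('.')[:len] == prefix or ip.split(':')[:len] == prefix:
--                 prefix_match = True
--                 break
--         # ipv6 with prefix length >64
--         else:
--             if ip.split(':')[:len] == prefix:
--                 prefix_match = True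
--                 break
--     return prefix_match
-- ===== SOURCE B (Python) =====
-- def match_prefix(ip, prefix_list, prefix_lengths):
--     """B: index prefixes in per-length sets, split the IP once, then one membership test per distinct length."""
--     buckets = {}
--     for p, l in zip(prefix_list, prefix_lengths):
--         buckets.setdefault(l, set()).add(tuple(p))
--     dot = ip.split('.')
--     colon = ip.split(':')
--     for l, s in buckets.items():
--         if tuple(colon[:l]) in s or (l <= 4 and tuple(dot[:l]) in s):
--             return True
--     return False
-- ===== Notes on version B (the rewrite author's own statement) =====
-- stated objective: faster
-- what changed: B splits the IP once and indexes the prefixes into per-length sets (dict of sets), replacing A's per-prefix re-split/re-slice and list comparison with one slice plus set membership test per distinct length.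
import Mathlib
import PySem

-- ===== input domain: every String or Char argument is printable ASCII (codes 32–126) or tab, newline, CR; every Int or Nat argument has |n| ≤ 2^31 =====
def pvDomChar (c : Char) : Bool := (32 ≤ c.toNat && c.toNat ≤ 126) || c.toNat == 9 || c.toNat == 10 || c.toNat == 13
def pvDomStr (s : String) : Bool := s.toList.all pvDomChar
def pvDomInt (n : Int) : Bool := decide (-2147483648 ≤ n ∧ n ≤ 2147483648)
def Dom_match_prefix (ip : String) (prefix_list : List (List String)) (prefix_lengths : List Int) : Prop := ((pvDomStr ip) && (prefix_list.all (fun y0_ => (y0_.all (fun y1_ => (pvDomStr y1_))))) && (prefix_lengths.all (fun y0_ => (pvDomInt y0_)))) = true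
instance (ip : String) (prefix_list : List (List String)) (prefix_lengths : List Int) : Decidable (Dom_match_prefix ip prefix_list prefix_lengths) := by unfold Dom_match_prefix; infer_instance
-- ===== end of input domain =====

-- B re-indexes the prefixes by length (per-length sets) and splits the IP once,
-- replacing A's per-item re-split and re-slice with one membership test per distinct
-- length; return value proved equal, no side effects in either.

-- ===== PORT A =====
-- ip.split(sep) for a non-empty literal sep: split? is some there, exact
def pySplit (ip sep : String) : List String := (PySem.Str.split? ip sep).getD []

-- A's loop with break: recursion over zip(prefix_list, prefix_lengths); the IP is
-- re-split on every iteration, as in A.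
def match_prefix_loopA (ip : String) : List (List String × Int) → Bool
  | [] => false
  | (p, l) :: rest =>
    if l ≤ 4 then
      if PySem.List.slice (pySplit ip ".") none (some l) == p
         || PySem.List.slice (pySplit ip ":") none (some l) == p then true
      else match_prefix_loopA ip rest
    else
      if PySem.List.slice (pySplit ip ":") none (some l) == p then true
      else match_prefix_loopA ip rest

def match_prefix (ip : String) (prefix_list : List (List String)) (prefix_lengths : List Int) : Bool :=
  match_prefix_loopA ip (prefix_list.zip prefix_lengths)

-- ===== PORT B =====
-- buckets.setdefault(l, set()).add(tuple(p))  ==  buckets[l] = buckets.get(l, set()) with p added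
def match_prefix_buckets (pairs : List (List String × Int)) : PySem.Dict Int (PySem.Set (List String)) :=
  pairs.foldl (fun d q => d.modify q.2 PySem.Set.empty (fun s => PySem.Set.add s q.1)) PySem.Dict.empty

def match_prefix_loopB (dot colon : List String) : List (Int × PySem.Set (List String)) → Bool
  | [] => false
  | (l, s) :: rest =>
    if PySem.Set.contains s (PySem.List.slice colon none (some l))
       || (decide (l ≤ 4) && PySem.Set.contains s (PySem.List.slice dot none (some l))) then true
    else match_prefix_loopB dot colon rest

def match_prefix_alt (ip : String) (prefix_list : List (List String)) (prefix_lengths : List Int) : Bool :=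
  let buckets := match_prefix_buckets (prefix_list.zip prefix_lengths)
  let dot := pySplit ip "."
  let colon := pySplit ip ":"
  match_prefix_loopB dot colon buckets.items

-- ===== PRECONDITION & SPEC =====
def Spec_match_prefix (ip : String) (prefix_list : List (List String)) (prefix_lengths : List Int) (out : Bool) : Prop := out = match_prefix_alt ip prefix_list prefix_lengths
instance (ip : String) (prefix_list : List (List String)) (prefix_lengths : List Int) (out : Bool) : Decidable (Spec_match_prefix ip prefix_list prefix_lengths out) := by unfold Spec_match_prefix; infer_instance

-- ===== CLAIM (what is proved, stated in full; the proofs are below) =====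
def Claim_equal_match_prefix : Prop := ∀ (ip : String) (prefix_list : List (List String)) (prefix_lengths : List Int), Dom_match_prefix ip prefix_list prefix_lengths → Spec_match_prefix ip prefix_list prefix_lengths (match_prefix ip prefix_list prefix_lengths)

-- ===== LEMMAS AND PROOFS =====

-- A's loop succeeds iff some pair matches (the ∨ normalised to B's shape).
theorem loopA_eq_true_iff (ip : String) (pairs : List (List String × Int)) :
    match_prefix_loopA ip pairs = true ↔
      ∃ q ∈ pairs,
        PySem.List.slice (pySplit ip ":") none (some q.2) = q.1 ∨
        (q.2 ≤ 4 ∧ PySem.List.slice (pySplit ip ".") none (some q.2) = q.1) := by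
  induction pairs with
  | nil => simp [match_prefix_loopA]
  | cons q rest ih =>
    obtain ⟨p, l⟩ := q
    by_cases hl : l ≤ 4
    · simp only [match_prefix_loopA, if_pos hl]
      by_cases hm : (PySem.List.slice (pySplit ip ".") none (some l) == p
          || PySem.List.slice (pySplit ip ":") none (some l) == p) = true
      · simp only [if_pos hm, true_iff]
        rcases Bool.or_eq_true_iff.mp hm with h | h
        · exact ⟨(p, l), List.mem_cons_self, Or.inr ⟨hl, eq_of_beq h⟩⟩
        · exact ⟨(p, l), List.mem_cons_self, Or.inl (eq_of_beq h)⟩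
      · simp only [if_neg hm, ih]
        constructor
        · rintro ⟨w, hw, hc⟩; exact ⟨w, List.mem_cons_of_mem _ hw, hc⟩
        · rintro ⟨w, hw, hc⟩
          rcases List.mem_cons.mp hw with rfl | hw
          · exfalso; apply hm
            rcases hc with h | ⟨_, h⟩
            · exact Bool.or_eq_true_iff.mpr (Or.inr (beq_iff_eq.mpr h))
            · exact Bool.or_eq_true_iff.mpr (Or.inl (beq_iff_eq.mpr h))
          · exact ⟨w, hw, hc⟩
    · simp only [match_prefix_loopA, if_neg hl]
      by_cases hm : (PySem.List.slice (pySplit ip ":") none (some l) == p) = true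
      · simp only [if_pos hm, true_iff]
        exact ⟨(p, l), List.mem_cons_self, Or.inl (eq_of_beq hm)⟩
      · simp only [if_neg hm, ih]
        constructor
        · rintro ⟨w, hw, hc⟩; exact ⟨w, List.mem_cons_of_mem _ hw, hc⟩
        · rintro ⟨w, hw, hc⟩
          rcases List.mem_cons.mp hw with rfl | hw
          · rcases hc with h | ⟨h4, _⟩
            · exact absurd (beq_iff_eq.mpr h) hm
            · exact absurd h4 hl
          · exact ⟨w, hw, hc⟩

-- bucket contents: x landed in the bucket of l iff (x, l) is one of the pairs
theorem mem_buckets_getD (pairs : List (List String × Int))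
    (d : PySem.Dict Int (PySem.Set (List String))) (l : Int) (x : List String) :
    x ∈ (pairs.foldl (fun d q => d.modify q.2 PySem.Set.empty (fun s => PySem.Set.add s q.1)) d).getD l PySem.Set.empty
      ↔ x ∈ d.getD l PySem.Set.empty ∨ (x, l) ∈ pairs := by
  induction pairs generalizing d with
  | nil => simp
  | cons q rest ih =>
    obtain ⟨p, l'⟩ := q
    rw [List.foldl_cons, ih, PySem.Dict.getD_modify]
    by_cases h : l = l'
    · subst h
      rw [if_pos rfl, PySem.Set.mem_add]
      constructor
      · rintro ((h1 | h1) | h1)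
        · exact Or.inl h1
        · exact Or.inr (by rw [h1]; exact List.mem_cons_self)
        · exact Or.inr (List.mem_cons_of_mem _ h1)
      · rintro (h1 | h1)
        · exact Or.inl (Or.inl h1)
        · rcases List.mem_cons.mp h1 with h2 | h2
          · exact Or.inl (Or.inr (congrArg Prod.fst h2))
          · exact Or.inr h2
    · rw [if_neg h]
      constructor
      · rintro (h1 | h1)
        · exact Or.inl h1
        · exact Or.inr (List.mem_cons_of_mem _ h1)
      · rintro (h1 | h1)
        · exact Or.inl h1
        · rcases List.mem_cons.mp h1 with h2 | h2
          · exact absurd (congrArg Prod.snd h2) h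
          · exact Or.inr h2

theorem keys_buckets (pairs : List (List String × Int)) :
    (match_prefix_buckets pairs).keys = PySem.Set.ofList (pairs.map (·.2)) := by
  unfold match_prefix_buckets
  rw [PySem.Dict.keys_foldl_modify_key pairs (·.2) PySem.Set.empty
        (fun _ q s => PySem.Set.add s q.1) PySem.Dict.empty]
  simpa using PySem.Set.update_empty (pairs.map (·.2))

theorem nodup_keys_buckets (pairs : List (List String × Int)) :
    (match_prefix_buckets pairs).keys.Nodup := by
  unfold match_prefix_buckets
  exact PySem.Dict.nodup_keys_foldl_modify_key pairs (·.2) PySem.Set.empty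
    (fun _ q s => PySem.Set.add s q.1) PySem.Dict.empty PySem.Dict.nodup_keys_empty

-- B's loop succeeds iff some (key, bucket) item matches
theorem loopB_eq_true_iff (dot colon : List String) (li : List (Int × PySem.Set (List String))) :
    match_prefix_loopB dot colon li = true ↔
      ∃ q ∈ li,
        PySem.List.slice colon none (some q.1) ∈ q.2 ∨
        (q.1 ≤ 4 ∧ PySem.List.slice dot none (some q.1) ∈ q.2) := by
  induction li with
  | nil => simp [match_prefix_loopB]
  | cons q rest ih =>
    obtain ⟨l, s⟩ := q
    by_cases h : (PySem.Set.contains s (PySem.List.slice colon none (some l))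
        || (decide (l ≤ 4) && PySem.Set.contains s (PySem.List.slice dot none (some l)))) = true
    · simp only [match_prefix_loopB, if_pos h, true_iff]
      refine ⟨(l, s), List.mem_cons_self, ?_⟩
      rcases Bool.or_eq_true_iff.mp h with h1 | h1
      · exact Or.inl (PySem.Set.contains_iff s _ |>.mp h1)
      · rcases Bool.and_eq_true_iff.mp h1 with ⟨h2, h3⟩
        exact Or.inr ⟨of_decide_eq_true h2, PySem.Set.contains_iff s _ |>.mp h3⟩
    · simp only [match_prefix_loopB, if_neg h, ih]
      constructor
      · rintro ⟨w, hw, hc⟩; exact ⟨w, List.mem_cons_of_mem _ hw, hc⟩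
      · rintro ⟨w, hw, hc⟩
        rcases List.mem_cons.mp hw with rfl | hw
        · exfalso; apply h
          rcases hc with h1 | ⟨h1, h2⟩
          · exact Bool.or_eq_true_iff.mpr (Or.inl (PySem.Set.contains_iff s _ |>.mpr h1))
          · exact Bool.or_eq_true_iff.mpr (Or.inr (Bool.and_eq_true_iff.mpr
              ⟨decide_eq_true h1, PySem.Set.contains_iff s _ |>.mpr h2⟩))
        · exact ⟨w, hw, hc⟩

theorem match_prefix_eq_alt (ip : String) (prefix_list : List (List String)) (prefix_lengths : List Int) :
    match_prefix ip prefix_list prefix_lengths = match_prefix_alt ip prefix_list prefix_lengths := by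
  set pairs := prefix_list.zip prefix_lengths with hp
  have hitems : (match_prefix_buckets pairs).items =
      (match_prefix_buckets pairs).keys.map
        (fun k => (k, (match_prefix_buckets pairs).getD k PySem.Set.empty)) :=
    PySem.Dict.items_eq_map_keys _ (nodup_keys_buckets pairs) _
  have hbucket : ∀ l x, x ∈ (match_prefix_buckets pairs).getD l PySem.Set.empty ↔ (x, l) ∈ pairs := by
    intro l x
    have h := mem_buckets_getD pairs PySem.Dict.empty l x
    rw [show (PySem.Dict.empty : PySem.Dict Int (PySem.Set (List String))).getD l PySem.Set.empty
        = PySem.Set.empty from rfl] at h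
    simpa [match_prefix_buckets, PySem.Set.empty] using h
  rw [Bool.eq_iff_iff]
  rw [show match_prefix ip prefix_list prefix_lengths = match_prefix_loopA ip pairs from rfl]
  rw [show match_prefix_alt ip prefix_list prefix_lengths
      = match_prefix_loopB (pySplit ip ".") (pySplit ip ":") (match_prefix_buckets pairs).items from rfl]
  rw [loopA_eq_true_iff, loopB_eq_true_iff, hitems]
  constructor
  · rintro ⟨⟨p, l⟩, hmem, hcond⟩
    refine ⟨(l, (match_prefix_buckets pairs).getD l PySem.Set.empty), ?_, ?_⟩
    · refine List.mem_map.mpr ⟨l, ?_, rfl⟩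
      rw [keys_buckets, PySem.Set.mem_ofList]
      exact List.mem_map.mpr ⟨(p, l), hmem, rfl⟩
    · rcases hcond with h | ⟨h4, h⟩
      · exact Or.inl ((hbucket l _).mpr (h ▸ hmem))
      · exact Or.inr ⟨h4, (hbucket l _).mpr (h ▸ hmem)⟩
  · rintro ⟨q, hq, hcond⟩
    rcases List.mem_map.mp hq with ⟨l, _, rfl⟩
    rcases hcond with h | ⟨h4, h⟩
    · exact ⟨(PySem.List.slice (pySplit ip ":") none (some l), l), (hbucket l _).mp h, Or.inl rfl⟩
    · exact ⟨(PySem.List.slice (pySplit ip ".") none (some l), l), (hbucket l _).mp h, Or.inr ⟨h4, rfl⟩⟩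

-- ===== VERDICT (by name: the statement is the Claim_ definition above) =====
theorem match_prefix_spec : Claim_equal_match_prefix := by
  intro ip prefix_list prefix_lengths _
  exact match_prefix_eq_alt ip prefix_list prefix_lengths
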